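-- pv_equiv track=rewrite | github.com/francoeromero/python_UTN | 2024/arrays/arrays.py | find_positions_values
-- ===== SOURCE A (Python) =====
-- def maximum_value(array:list):
--
--     max = array[0]
--     position = 0
--
--     for i in range(len(array)):
--         if i == 0 or array[i] > max:
--             max = array[i]
--             position = i
--     return position
--
-- def find_positions_values(array:list):
--
--     positions = []
--     position_max = maximum_value(array)
--     value_max = array[position_max]
--
--     for i in range(len(array)):
--         if array[i] == value_max:
--             positions.append(i)
--     return positions
-- ===== SOURCE B (Python) =====
-- def find_positions_values(array: list):
--     maxv = array[0]
--     positions = []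
--     for i in range(len(array)):
--         if array[i] > maxv:
--             maxv = array[i]
--             positions = [i]
--         elif array[i] == maxv:
--             positions.append(i)
--     return positions
-- ===== Notes on version B (the rewrite author's own statement) =====
-- stated objective: faster
-- what changed: Single pass maintaining the running max and its index list together (reset on a new max), replacing the two-pass max-then-rescan with a helper.
import Mathlib
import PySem

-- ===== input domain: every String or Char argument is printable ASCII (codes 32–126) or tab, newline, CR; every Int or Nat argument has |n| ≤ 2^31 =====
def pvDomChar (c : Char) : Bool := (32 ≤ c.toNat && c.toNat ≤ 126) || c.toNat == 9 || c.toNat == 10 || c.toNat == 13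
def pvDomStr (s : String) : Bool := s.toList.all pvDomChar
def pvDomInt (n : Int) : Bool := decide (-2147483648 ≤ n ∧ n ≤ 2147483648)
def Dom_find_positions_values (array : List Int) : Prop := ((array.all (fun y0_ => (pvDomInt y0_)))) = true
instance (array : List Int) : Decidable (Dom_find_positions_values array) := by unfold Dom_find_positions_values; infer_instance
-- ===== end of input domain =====

-- B is a single pass maintaining the running max with its index list (reset on a new max),
-- replacing A's max-position helper plus rescan.

-- ===== PORT A =====
-- 'array[0]' raises IndexError on []: excluded by Pre_; the getD default is never read under Pre_.
def maximum_value (array : List Int) : Int :=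
  let s := (PySem.List.pyRange 0 array.length 1).foldl
    (fun (s : Int × Int) i =>
      if i = 0 ∨ PySem.List.pyGetD array i 0 > s.1
      then (PySem.List.pyGetD array i 0, i) else s)
    (((PySem.List.pyGet? array 0).getD 0), 0)
  s.2

def find_positions_values (array : List Int) : List Int :=
  let position_max := maximum_value array
  let value_max := PySem.List.pyGetD array position_max 0
  (PySem.List.pyRange 0 array.length 1).foldl
    (fun acc i => if PySem.List.pyGetD array i 0 = value_max then acc ++ [i] else acc) []

-- ===== PORT B =====
def find_positions_values_alt (array : List Int) : List Int :=
  let s := (PySem.List.pyRange 0 array.length 1).foldl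
    (fun (s : Int × List Int) i =>
      let x := PySem.List.pyGetD array i 0
      if x > s.1 then (x, [i])
      else if x = s.1 then (s.1, s.2 ++ [i]) else s)
    (((PySem.List.pyGet? array 0).getD 0), [])
  s.2

-- ===== PRECONDITION & SPEC =====
-- Both A and B read array[0] first: the empty list raises IndexError in both and is excluded.
def Pre_find_positions_values (array : List Int) : Prop := array ≠ []
instance (array : List Int) : Decidable (Pre_find_positions_values array) := by unfold Pre_find_positions_values; infer_instance
def pvWitness_find_positions_values : List Int := [3, 1, 3]

def Spec_find_positions_values (array : List Int) (out : List Int) : Prop := out = find_positions_values_alt array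
instance (array : List Int) (out : List Int) : Decidable (Spec_find_positions_values array out) := by unfold Spec_find_positions_values; infer_instance

-- ===== CLAIM (what is proved, stated in full; the proofs are below) =====
def Claim_equal_find_positions_values : Prop := ∀ (array : List Int), Dom_find_positions_values array → Pre_find_positions_values array → Spec_find_positions_values array (find_positions_values array)

-- ===== LEMMAS AND PROOFS =====

-- Abbreviations for the two loop bodies (proof-side only).
def stepA (array : List Int) (s : Int × Int) (i : Int) : Int × Int :=
  if i = 0 ∨ PySem.List.pyGetD array i 0 > s.1
  then (PySem.List.pyGetD array i 0, i) else s

def stepB (array : List Int) (s : Int × List Int) (i : Int) : Int × List Int :=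
  let x := PySem.List.pyGetD array i 0
  if x > s.1 then (x, [i])
  else if x = s.1 then (s.1, s.2 ++ [i]) else s

def a0 (array : List Int) : Int := (PySem.List.pyGet? array 0).getD 0

-- Joint invariant after processing range(0, m), for 1 ≤ m:
-- the two running maxima agree, A's position carries that value, the max bounds the prefix,
-- and B's list is exactly the prefix indices achieving the max.
theorem joint_inv (array : List Int) (m : Nat) (hm : 1 ≤ m) (hlen : m ≤ array.length) :
    let sA := (PySem.List.pyRange 0 (m : Int) 1).foldl (stepA array) (a0 array, 0)
    let sB := (PySem.List.pyRange 0 (m : Int) 1).foldl (stepB array) (a0 array, [])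
    sA.1 = sB.1 ∧
    (0 ≤ sA.2 ∧ sA.2 < (m : Int) ∧ PySem.List.pyGetD array sA.2 0 = sA.1) ∧
    (∀ i : Int, 0 ≤ i → i < (m : Int) → PySem.List.pyGetD array i 0 ≤ sA.1) ∧
    sB.2 = (PySem.List.pyRange 0 (m : Int) 1).filter
             (fun i => decide (PySem.List.pyGetD array i 0 = sB.1)) := by
  induction m with
  | zero => omega
  | succ m ih =>
    by_cases hm1 : m = 0
    · subst hm1
      -- base case m = 1: range(0, 1) = [0]
      have h0 : PySem.List.pyGetD array 0 0 = a0 array := by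
        cases array with
        | nil => simp at hlen
        | cons x t => simp [PySem.List.pyGetD, PySem.List.pyGet?, PySem.List.pyIdx?, a0]
      have hr : PySem.List.pyRange 0 ((0 + 1 : Nat) : Int) 1 = [0] := by decide
      simp only [hr, List.foldl_cons, List.foldl_nil, List.filter_cons, List.filter_nil]
      have hA0 : stepA array (a0 array, 0) 0 = (a0 array, 0) := by simp [stepA, h0]
      have hB0 : stepB array (a0 array, []) 0 = (a0 array, [0]) := by simp [stepB, h0]
      rw [hA0, hB0]
      refine ⟨rfl, ⟨le_refl 0, by norm_num, h0⟩, ?_, ?_⟩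
      · intro i h1 h2
        have : i = 0 := by omega
        subst this
        exact le_of_eq h0
      · simp [h0]
    · -- inductive step: peel index m off range(0, m+1)
      have hsplit : PySem.List.pyRange 0 ((m + 1 : Nat) : Int) 1
          = PySem.List.pyRange 0 (m : Int) 1 ++ [(m : Int)] := by
        push_cast
        exact PySem.List.pyRange_one_succ_right (by positivity)
      have hmm : 1 ≤ m := by omega
      have hlen' : m ≤ array.length := by omega
      obtain ⟨h1, ⟨hp0, hpm, hpv⟩, hub, hfil⟩ := ih hmm hlen'
      set sA := (PySem.List.pyRange 0 (m : Int) 1).foldl (stepA array) (a0 array, 0) with hsA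
      set sB := (PySem.List.pyRange 0 (m : Int) 1).foldl (stepB array) (a0 array, []) with hsB
      simp only [hsplit, List.foldl_append, List.foldl_cons, List.foldl_nil, List.filter_append,
        List.filter_cons, List.filter_nil]
      set x := PySem.List.pyGetD array (m : Int) 0 with hx
      by_cases hgt : x > sA.1
      · -- new strict max at index m
        have hA : stepA array sA (m : Int) = (x, (m : Int)) := by
          simp [stepA, hm1, ← hx, hgt]
        have hB : stepB array sB (m : Int) = (x, [(m : Int)]) := by
          simp only [stepB]
          rw [← hx, ← h1]
          simp [hgt]
        rw [hA, hB]
        refine ⟨rfl, ⟨by positivity, by push_cast; omega, hx.symm⟩, ?_, ?_⟩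
        · intro i hi1 hi2
          by_cases him : i < (m : Int)
          · exact le_trans (hub i hi1 him) (le_of_lt hgt)
          · have : i = (m : Int) := by omega
            subst this
            rw [← hx]
        · -- no prefix index reaches the new, strictly larger max
          have hempty : (PySem.List.pyRange 0 (m : Int) 1).filter
              (fun i => decide (PySem.List.pyGetD array i 0 = x)) = [] := by
            rw [List.filter_eq_nil_iff]
            intro i hi
            rw [PySem.List.mem_pyRange_one] at hi
            have := hub i hi.1 hi.2
            simp only [decide_eq_true_eq]
            omega
          simp [hempty, ← hx]
      · by_cases heq : x = sA.1
        · -- equal to the running max: A unchanged, B appends m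
          have hA : stepA array sA (m : Int) = sA := by
            simp [stepA, hm1, ← hx, hgt]
          have hB : stepB array sB (m : Int) = (sB.1, sB.2 ++ [(m : Int)]) := by
            simp only [stepB]
            rw [← hx]
            rw [h1] at hgt heq
            simp [hgt, heq]
          rw [hA, hB]
          refine ⟨h1, ⟨hp0, by push_cast; omega, hpv⟩, ?_, ?_⟩
          · intro i hi1 hi2
            by_cases him : i < (m : Int)
            · exact hub i hi1 him
            · have : i = (m : Int) := by omega
              subst this
              rw [← hx]
              omega
          · rw [h1] at heq
            simp [← hx, heq, hfil]
        · -- strictly below the running max: both states unchanged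
          have hA : stepA array sA (m : Int) = sA := by
            simp [stepA, hm1, ← hx, hgt]
          have hB : stepB array sB (m : Int) = sB := by
            simp only [stepB]
            rw [← hx]
            rw [h1] at hgt heq
            simp [hgt, heq]
          rw [hA, hB]
          refine ⟨h1, ⟨hp0, by push_cast; omega, hpv⟩, ?_, ?_⟩
          · intro i hi1 hi2
            by_cases him : i < (m : Int)
            · exact hub i hi1 him
            · have : i = (m : Int) := by omega
              subst this
              rw [← hx]
              omega
          · rw [h1] at heq
            simp [← hx, heq, hfil]

-- ===== VERDICT (by name: the statement is the Claim_ definition above) =====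
theorem find_positions_values_spec : Claim_equal_find_positions_values := by
  intro array _ hpre
  have hlen : 1 ≤ array.length := by
    cases array with
    | nil => exact absurd rfl hpre
    | cons x t => simp
  obtain ⟨h1, ⟨hp0, hpm, hpv⟩, hub, hfil⟩ := joint_inv array array.length hlen (le_refl _)
  show find_positions_values array = find_positions_values_alt array
  unfold find_positions_values find_positions_values_alt maximum_value
  rw [PySem.List.foldl_append_ite_eq_filter]
  change ([] : List Int) ++ (PySem.List.pyRange 0 (array.length : Int) 1).filter
      (fun i => decide (PySem.List.pyGetD array i 0
        = PySem.List.pyGetD array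
            ((PySem.List.pyRange 0 (array.length : Int) 1).foldl (stepA array) (a0 array, 0)).2 0))
    = ((PySem.List.pyRange 0 (array.length : Int) 1).foldl (stepB array) (a0 array, [])).2
  rw [List.nil_append, hpv, h1, hfil]
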